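-- pv_equiv track=rewrite | github.com/JoJoJacKy/datastructures | Chapter7BigOEverydayCode.py | oneHunnetSum
-- ===== SOURCE A (Python) =====
-- def oneHunnetSum(listArray):
--     leftIndex = 0
--     rightIndex = len(listArray) - 1
--
--     while leftIndex < len(listArray) / 2: # Only Iterates up to half of the elements in the array
--         if listArray[leftIndex] + listArray[rightIndex] != 100:
--             return False
--
--         leftIndex += 1
--         rightIndex -= 1
--
--     return True
-- ===== SOURCE B (Python) =====
-- def oneHunnetSum(listArray):
--     n = len(listArray)
--     h = (n + 1) // 2
--     mirror = [100 - x for x in listArray[n - h:]]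
--     mirror.reverse()
--     return listArray[:h] == mirror
-- ===== Notes on version B (the rewrite author's own statement) =====
-- stated objective: alternative
-- what changed: Instead of walking two converging indices and testing each pair's sum, B builds the complement list [100 - x] of the trailing half, reverses it, and compares it for list equality with the leading half; positions i and n-1-i agree under that comparison exactly when their sum is 100 (the odd middle element compares with its own complement, i.e. 2x == 100, matching A's self-pair check).
import Mathlib
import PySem

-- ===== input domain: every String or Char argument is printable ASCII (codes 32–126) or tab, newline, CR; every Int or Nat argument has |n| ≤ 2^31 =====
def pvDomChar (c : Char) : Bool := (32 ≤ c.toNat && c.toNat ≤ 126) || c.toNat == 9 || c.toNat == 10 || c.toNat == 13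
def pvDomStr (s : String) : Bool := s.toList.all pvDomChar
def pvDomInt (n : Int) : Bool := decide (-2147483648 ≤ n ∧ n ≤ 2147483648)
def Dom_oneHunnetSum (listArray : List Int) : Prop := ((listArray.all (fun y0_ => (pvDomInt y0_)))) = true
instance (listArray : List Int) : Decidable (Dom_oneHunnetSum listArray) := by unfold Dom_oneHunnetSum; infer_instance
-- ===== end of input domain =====

-- B replaces A's converging-index pair test by a staged construction: it complements (100 - x)
-- the trailing half, reverses it, and compares it with the leading half for list equality.

-- ===== PORT A =====
-- The while loop over the two Int counters; fuel = listArray.length only makes the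
-- recursion structural (the loop runs at most ⌈len/2⌉ ≤ len times, so fuel never runs out).
-- `leftIndex < len(listArray) / 2` (Python true division) holds iff 2*leftIndex < len.
-- Indices are always in range when read, so the pyGetD default 0 is never taken.
def oneHunnetSumLoop (listArray : List Int) (fuel : Nat) (leftIndex rightIndex : Int) : Bool :=
  match fuel with
  | 0 => true
  | fuel + 1 =>
    if 2 * leftIndex < (listArray.length : Int) then
      if PySem.List.pyGetD listArray leftIndex 0 + PySem.List.pyGetD listArray rightIndex 0 ≠ 100 then
        false
      else
        oneHunnetSumLoop listArray fuel (leftIndex + 1) (rightIndex - 1)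
    else
      true

def oneHunnetSum (listArray : List Int) : Bool :=
  oneHunnetSumLoop listArray listArray.length 0 ((listArray.length : Int) - 1)

-- ===== PORT B =====
-- xs[n-h:] and xs[:h] have non-negative in-range bounds (0 ≤ n-h ≤ n, 0 ≤ h ≤ n),
-- where Python slicing is exactly List.drop / List.take.
def oneHunnetSum_alt (listArray : List Int) : Bool :=
  let n := listArray.length
  let h := (n + 1) / 2
  let mirror := (listArray.drop (n - h)).map (fun x => 100 - x)
  listArray.take h == mirror.reverse

-- ===== PRECONDITION & SPEC =====
def Spec_oneHunnetSum (listArray : List Int) (out : Bool) : Prop := out = oneHunnetSum_alt listArray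
instance (listArray : List Int) (out : Bool) : Decidable (Spec_oneHunnetSum listArray out) := by unfold Spec_oneHunnetSum; infer_instance

-- ===== CLAIM (what is proved, stated in full; the proofs are below) =====
def Claim_equal_oneHunnetSum : Prop := ∀ (listArray : List Int), Dom_oneHunnetSum listArray → Spec_oneHunnetSum listArray (oneHunnetSum listArray)

-- ===== LEMMAS AND PROOFS =====

-- the mirrored-pair condition at Nat index i (abbrev so Decidable inference sees through it)
abbrev mirrorAt (xs : List Int) (i : Nat) : Prop :=
  xs.getD i 0 + xs.getD (xs.length - 1 - i) 0 = 100

theorem loop_char (xs : List Int) (fuel k : Nat)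
    (hfuel : xs.length ≤ fuel + 2 * k) :
    oneHunnetSumLoop xs fuel (k : Int) ((xs.length : Int) - 1 - (k : Int)) =
      decide (∀ i < xs.length, k ≤ i → 2 * i < xs.length → mirrorAt xs i) := by
  induction fuel generalizing k with
  | zero =>
    rw [oneHunnetSumLoop]
    symm
    rw [decide_eq_true_eq]
    intro i hlen hi h2i
    omega
  | succ fuel ih =>
  rw [oneHunnetSumLoop]
  by_cases h : 2 * k < xs.length
  · rw [if_pos (by omega : 2 * (k : Int) < (xs.length : Int))]
    have hrw : ((xs.length : Int) - 1 - (k : Int)) = ((xs.length - 1 - k : Nat) : Int) := by omega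
    rw [hrw, PySem.List.pyGetD_natCast, PySem.List.pyGetD_natCast]
    by_cases hm : mirrorAt xs k
    · rw [if_neg (not_not_intro hm)]
      have h1 : (k : Int) + 1 = ((k + 1 : Nat) : Int) := by omega
      have h2 : ((xs.length - 1 - k : Nat) : Int) - 1 = (xs.length : Int) - 1 - ((k + 1 : Nat) : Int) := by omega
      rw [h1, h2, ih (k + 1) (by omega), decide_eq_decide]
      constructor
      · intro hall i hlen hi h2i
        rcases Nat.eq_or_lt_of_le hi with rfl | hlt
        · exact hm
        · exact hall i hlen hlt h2i
      · intro hall i hlen hi h2i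
        exact hall i hlen (Nat.le_of_succ_le hi) h2i
    · rw [if_pos hm]
      symm
      rw [decide_eq_false_iff_not]
      intro hall
      exact hm (hall k (by omega) le_rfl h)
  · rw [if_neg (by omega : ¬ 2 * (k : Int) < (xs.length : Int))]
    symm
    rw [decide_eq_true_eq]
    intro i hlen hi h2i
    omega

theorem A_char (xs : List Int) :
    oneHunnetSum xs = decide (∀ i < xs.length, 2 * i < xs.length → mirrorAt xs i) := by
  have h := loop_char xs xs.length 0 (by omega)
  simpa [oneHunnetSum] using h

theorem B_char (xs : List Int) :
    oneHunnetSum_alt xs = decide (∀ i < xs.length, 2 * i < xs.length → mirrorAt xs i) := by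
  unfold oneHunnetSum_alt
  rw [Bool.eq_iff_iff, beq_iff_eq, decide_eq_true_eq]
  have hh : (xs.length + 1) / 2 ≤ xs.length := by omega
  have hlt : xs.length - (xs.length + 1) / 2 ≤ xs.length := by omega
  have hlen : (xs.take ((xs.length + 1) / 2)).length
      = (((xs.drop (xs.length - (xs.length + 1) / 2)).map (fun x => 100 - x)).reverse).length := by
    simp; omega
  constructor
  · intro heq i _ h2i
    have hi : i < (xs.take ((xs.length + 1) / 2)).length := by simp; omega
    have hv := List.getElem_of_eq heq hi
    rw [List.getElem_take, List.getElem_reverse, List.getElem_map, List.getElem_drop] at hv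
    unfold mirrorAt
    have hix : i < xs.length := by omega
    rw [List.getD_eq_getElem xs 0 hix,
        List.getD_eq_getElem xs 0 (by omega : xs.length - 1 - i < xs.length)]
    have harg : xs.length - (xs.length + 1) / 2
        + ((((xs.drop (xs.length - (xs.length + 1) / 2)).map (fun x => 100 - x)).length - 1 - i))
        = xs.length - 1 - i := by simp; omega
    simp only [harg] at hv
    omega
  · intro hall
    apply List.ext_getElem hlen
    intro i hi₁ hi₂
    rw [List.getElem_take, List.getElem_reverse, List.getElem_map, List.getElem_drop]
    have h2i : 2 * i < xs.length := by simp at hi₁; omega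
    have hm := hall i (by omega) h2i
    unfold mirrorAt at hm
    rw [List.getD_eq_getElem xs 0 (by omega : i < xs.length),
        List.getD_eq_getElem xs 0 (by omega : xs.length - 1 - i < xs.length)] at hm
    have harg : xs.length - (xs.length + 1) / 2
        + ((((xs.drop (xs.length - (xs.length + 1) / 2)).map (fun x => 100 - x)).length - 1 - i))
        = xs.length - 1 - i := by simp; omega
    simp only [harg]
    omega

-- ===== VERDICT (by name: the statement is the Claim_ definition above) =====
theorem oneHunnetSum_spec : Claim_equal_oneHunnetSum := by
  intro xs _
  unfold Spec_oneHunnetSum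
  rw [A_char, B_char]
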